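-- pv_equiv track=rewrite | github.com/CarlosjVar/Rectoria | Pythonuntitled2/Práctica recursividad/practica recursividad.py | esParEnPosicion
-- ===== SOURCE A (Python) =====
-- def esParEnPosicion (pnum,cont,pos):
--     """"
--     Funcionamiento: Determina si el dígito en una determinada posición del numero
--     dado es par
--     Entradas: pnum (int),cont (int), pos(int)
--     Salidas: True en caso de ser par, False en caso contrario
--     """
--     if cont==pos:
--         dig=pnum%10
--         if esPar(dig):
--             return True
--         else:
--             return False
--     else:
--         return esParEnPosicion((pnum//10),(cont+1),pos)
--
-- def esPar(pnum):
--     """"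
--     Funcionamiento: Determina si un número es par
--     Entradas: pnum (int)
--     Salidas: True si es par, False en caso contrario
--     """
--     if pnum%2==0:
--         return True
--     else:
--         return False
-- ===== SOURCE B (Python) =====
-- def esParEnPosicion(pnum, cont, pos):
--     """Closed form: extract the digit at the given position directly and test parity."""
--     return (pnum // 10 ** (pos - cont)) % 10 % 2 == 0
-- ===== Notes on version B (the rewrite author's own statement) =====
-- stated objective: simpler
-- what changed: Replaced the digit-stripping recursion (and the esPar helper) by a single closed-form expression pnum // 10**(pos-cont) % 10 % 2 == 0.
import Mathlib
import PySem

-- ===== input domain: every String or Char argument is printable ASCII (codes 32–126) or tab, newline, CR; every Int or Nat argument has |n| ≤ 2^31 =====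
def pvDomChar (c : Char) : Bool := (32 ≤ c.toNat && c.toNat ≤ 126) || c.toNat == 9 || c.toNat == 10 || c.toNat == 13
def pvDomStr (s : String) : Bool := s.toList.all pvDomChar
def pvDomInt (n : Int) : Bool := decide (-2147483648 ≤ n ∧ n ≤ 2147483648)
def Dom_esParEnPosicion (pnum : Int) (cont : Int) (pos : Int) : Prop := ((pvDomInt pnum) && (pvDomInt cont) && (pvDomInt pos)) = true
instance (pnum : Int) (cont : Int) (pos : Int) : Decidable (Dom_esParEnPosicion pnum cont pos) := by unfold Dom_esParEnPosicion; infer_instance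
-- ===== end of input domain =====

-- B replaces A's digit-stripping recursion by one closed-form arithmetic expression (objective: simpler).

-- ===== PORT A =====
-- esPar helper, literal
def esPar (pnum : Int) : Bool :=
  if PySem.Int.mod pnum 2 == 0 then true else false

-- A's recursion, with a fuel guard (the recursion depth is pos - cont when cont ≤ pos;
-- outside that A does not terminate, which Pre_ excludes)
def esParEnPosicionGo (fuel : Nat) (pnum : Int) (cont : Int) (pos : Int) : Bool :=
  match fuel with
  | 0 => false
  | f + 1 =>
    if cont == pos then
      let dig := PySem.Int.mod pnum 10
      if esPar dig then true else false
    else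
      esParEnPosicionGo f (PySem.Int.floordiv pnum 10) (cont + 1) pos

def esParEnPosicion (pnum : Int) (cont : Int) (pos : Int) : Bool :=
  esParEnPosicionGo ((pos - cont).toNat + 1) pnum cont pos

-- ===== PORT B =====
def esParEnPosicion_alt (pnum : Int) (cont : Int) (pos : Int) : Bool :=
  PySem.Int.mod (PySem.Int.mod (PySem.Int.floordiv pnum (10 ^ (pos - cont).toNat)) 10) 2 == 0

-- ===== PRECONDITION & SPEC =====
-- Pre_ excludes cont > pos, where A recurses without a base case and raises RecursionError.
def Pre_esParEnPosicion (pnum : Int) (cont : Int) (pos : Int) : Prop :=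
  cont ≤ pos
instance (pnum : Int) (cont : Int) (pos : Int) : Decidable (Pre_esParEnPosicion pnum cont pos) := by unfold Pre_esParEnPosicion; infer_instance
def pvWitness_esParEnPosicion : Int × Int × Int := (12345, 0, 2)

def Spec_esParEnPosicion (pnum : Int) (cont : Int) (pos : Int) (out : Bool) : Prop := out = esParEnPosicion_alt pnum cont pos
instance (pnum : Int) (cont : Int) (pos : Int) (out : Bool) : Decidable (Spec_esParEnPosicion pnum cont pos out) := by unfold Spec_esParEnPosicion; infer_instance

-- ===== CLAIM (what is proved, stated in full; the proofs are below) =====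
def Claim_equal_esParEnPosicion : Prop := ∀ (pnum : Int) (cont : Int) (pos : Int), Dom_esParEnPosicion pnum cont pos → Pre_esParEnPosicion pnum cont pos → Spec_esParEnPosicion pnum cont pos (esParEnPosicion pnum cont pos)

-- ===== LEMMAS AND PROOFS =====

lemma alt_step (pnum cont pos : Int) (h : cont < pos) :
    esParEnPosicion_alt (PySem.Int.floordiv pnum 10) (cont + 1) pos = esParEnPosicion_alt pnum cont pos := by
  unfold esParEnPosicion_alt
  have hk : (pos - cont).toNat = (pos - (cont + 1)).toNat + 1 := by omega
  have h10 : (0:Int) < 10 := by norm_num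
  have hp : (0:Int) < 10 ^ (pos - (cont + 1)).toNat := pow_pos h10 _
  have harg : pnum / 10 / 10 ^ (pos - (cont + 1)).toNat = pnum / 10 ^ ((pos - (cont + 1)).toNat + 1) := by
    rw [Int.ediv_ediv_of_nonneg (by norm_num), pow_succ]
    ring_nf
  rw [hk, PySem.Int.floordiv_eq_ediv_of_pos h10,
      PySem.Int.floordiv_eq_ediv_of_pos hp,
      PySem.Int.floordiv_eq_ediv_of_pos (by positivity : (0:Int) < 10 ^ ((pos - (cont+1)).toNat + 1)),
      harg]

lemma go_eq_alt (fuel : Nat) : ∀ (pnum cont pos : Int), cont ≤ pos → (pos - cont).toNat < fuel →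
    esParEnPosicionGo fuel pnum cont pos = esParEnPosicion_alt pnum cont pos := by
  induction fuel with
  | zero => intro _ _ _ _ hf; omega
  | succ f ih =>
    intro pnum cont pos hle hf
    unfold esParEnPosicionGo
    by_cases hc : cont = pos
    · subst hc
      have h0 : (cont - cont).toNat = 0 := by omega
      unfold esPar esParEnPosicion_alt
      rw [h0, pow_zero, PySem.Int.floordiv_eq_ediv_of_pos (show (0:Int) < 1 by norm_num), Int.ediv_one]
      rw [PySem.Int.mod_eq_emod_of_pos (show (0:Int) < 2 by norm_num),
          PySem.Int.mod_eq_emod_of_pos (show (0:Int) < 10 by norm_num)]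
      simp
      rcases Int.emod_two_eq pnum with h | h <;> simp [h] <;> omega
    · have hlt : cont < pos := lt_of_le_of_ne hle hc
      have : (cont == pos) = false := by simp [hc]
      rw [this]
      simp only [Bool.false_eq_true, if_false]
      rw [ih (PySem.Int.floordiv pnum 10) (cont + 1) pos (by omega) (by omega)]
      exact alt_step pnum cont pos hlt

-- ===== VERDICT (by name: the statement is the Claim_ definition above) =====
theorem esParEnPosicion_spec : Claim_equal_esParEnPosicion := by
  intro pnum cont pos _ hpre
  unfold Spec_esParEnPosicion esParEnPosicion
  exact go_eq_alt _ pnum cont pos hpre (by omega)
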